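-- pv_equiv track=rewrite | github.com/ligsow6/DocGen | docgen/services/scan_service.py | _index_by_name
-- ===== SOURCE A (Python) =====
-- def _index_by_name(rel_files: list[str]) -> dict[str, list[str]]:
--     index: dict[str, list[str]] = {}
--     for path in rel_files:
--         name = path.rsplit("/", 1)[-1]
--         index.setdefault(name, []).append(path)
--     for value in index.values():
--         value.sort()
--     return index
-- ===== SOURCE B (Python) =====
-- def _index_by_name(rel_files: list[str]) -> dict[str, list[str]]:
--     # basenames in first-occurrence order, then one sorted filter per basename
--     return {
--         name: sorted(p for p in rel_files if p.rsplit("/", 1)[-1] == name)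
--         for name in dict.fromkeys(p.rsplit("/", 1)[-1] for p in rel_files)
--     }
-- ===== Notes on version B (the rewrite author's own statement) =====
-- stated objective: simpler
-- what changed: B replaces A's incremental dict-building loop and in-place per-bucket sorts by a single dict comprehension: deduplicate the basenames in first-occurrence order, then for each basename build its bucket as a sorted filter of the input list.
import Mathlib
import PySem

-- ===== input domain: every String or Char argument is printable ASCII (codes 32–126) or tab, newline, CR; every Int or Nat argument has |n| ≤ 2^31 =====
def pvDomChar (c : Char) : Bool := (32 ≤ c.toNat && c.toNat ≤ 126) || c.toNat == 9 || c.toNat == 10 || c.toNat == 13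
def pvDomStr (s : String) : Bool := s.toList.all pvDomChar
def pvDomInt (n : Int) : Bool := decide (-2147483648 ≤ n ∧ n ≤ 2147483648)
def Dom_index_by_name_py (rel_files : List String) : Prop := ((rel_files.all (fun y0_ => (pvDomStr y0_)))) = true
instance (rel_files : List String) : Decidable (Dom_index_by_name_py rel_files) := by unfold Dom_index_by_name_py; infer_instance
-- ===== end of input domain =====

-- B replaces A's incremental dict-building loop and in-place bucket sorts by one comprehension:
-- deduplicate the basenames in first-occurrence order, then one sorted filter per basename.


-- ===== PORT A =====
-- hand port of `s.rsplit("/", 1)[-1]` for the single-character separator "/": the suffix of s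
-- after the last '/' (the whole string if there is none) — exact on all strings.
def pvBn (s : String) : String :=
  String.ofList ((s.toList.reverse.takeWhile (fun c => c != '/')).reverse)

def index_by_name_py (rel_files : List String) : List (String × List String) :=
  -- index: dict[str, list[str]] = {}; for path: index.setdefault(name, []).append(path)
  let index : PySem.Dict String (List String) :=
    rel_files.foldl (fun d path => d.modify (pvBn path) [] (fun v => v ++ [path])) PySem.Dict.empty
  -- for value in index.values(): value.sort()
  index.items.map (fun kv => (kv.1, PySem.List.sorted kv.2 (fun x => x) false))

-- ===== PORT B =====
def index_by_name_py_alt (rel_files : List String) : List (String × List String) :=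
  -- {name: sorted(p for p in rel_files if bn(p) == name) for name in dict.fromkeys(bn(p) for p ...)}
  -- dict.fromkeys keeps the distinct basenames in first-occurrence order = PySem.List.dedup
  (PySem.List.dedup (rel_files.map pvBn)).map (fun name =>
    (name, PySem.List.sorted (rel_files.filter (fun p => pvBn p == name)) (fun x => x) false))

-- ===== PRECONDITION & SPEC =====
def Spec_index_by_name_py (rel_files : List String) (out : List (String × List String)) : Prop := out = index_by_name_py_alt rel_files
instance (rel_files : List String) (out : List (String × List String)) : Decidable (Spec_index_by_name_py rel_files out) := by unfold Spec_index_by_name_py; infer_instance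

-- ===== CLAIM (what is proved, stated in full; the proofs are below) =====
def Claim_equal_index_by_name_py : Prop := ∀ (rel_files : List String), Dom_index_by_name_py rel_files → Spec_index_by_name_py rel_files (index_by_name_py rel_files)

-- ===== LEMMAS AND PROOFS =====

-- the unsorted groups of l, keyed by basename in first-occurrence order
def pvG (l : List String) : List (String × List String) :=
  (PySem.List.dedup (l.map pvBn)).map (fun n => (n, l.filter (fun p => pvBn p == n)))

theorem pvFind (ns : List String) (g : String → List String) (k : String)
    (hnd : ns.Nodup) (hk : k ∈ ns) :
    (ns.map (fun n => (n, g n))).find? (fun q => q.1 == k) = some (k, g k) := by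
  induction ns with
  | nil => cases hk
  | cons n ns ih =>
    rw [List.map_cons]
    by_cases h : n = k
    · subst h
      rw [List.find?_cons_of_pos (by simp)]
    · rw [List.find?_cons_of_neg (by simp [h])]
      exact ih hnd.of_cons (by
        cases hk with
        | head => exact absurd rfl h
        | tail _ hmem => exact hmem)

theorem pvOfList_concat {α : Type} [BEq α] (xs : List α) (x : α) :
    PySem.Set.ofList (xs ++ [x]) = (PySem.Set.ofList xs).add x := by
  simp [PySem.Set.ofList, List.foldl_append]

-- A's setdefault/append loop builds exactly the first-occurrence grouping pvG
theorem pvItems (l : List String) :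
    (l.foldl (fun d path => PySem.Dict.modify d (pvBn path) [] (fun v => v ++ [path]))
      PySem.Dict.empty).items = pvG l := by
  induction l using List.reverseRecOn with
  | nil => rfl
  | append_singleton l p ih =>
    rw [List.foldl_append, List.foldl_cons, List.foldl_nil]
    have hd : (l.foldl (fun d path => PySem.Dict.modify d (pvBn path) [] (fun v => v ++ [path]))
        PySem.Dict.empty) = PySem.Dict.mk (pvG l) := by
      apply PySem.Dict.ext; exact ih
    rw [hd]
    have hkeys : pvG l = (PySem.List.dedup (l.map pvBn)).map
        (fun n => (n, l.filter (fun p => pvBn p == n))) := rfl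
    by_cases h : pvBn p ∈ l.map pvBn
    · -- basename already present: modify rewrites that single entry in place
      have hc : (PySem.Dict.mk (pvG l)).contains (pvBn p) = true := by
        simp only [PySem.Dict.contains, hkeys, List.any_map, List.any_eq_true,
          Function.comp, beq_iff_eq]
        exact ⟨pvBn p, (PySem.Set.mem_ofList _ _).2 h, rfl⟩
      have hget : (PySem.Dict.mk (pvG l)).getD (pvBn p) [] = l.filter (fun q => pvBn q == pvBn p) := by
        simp only [PySem.Dict.getD, PySem.Dict.get?, hkeys]
        rw [pvFind (PySem.List.dedup (l.map pvBn)) _ _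
          (show (PySem.List.dedup (l.map pvBn)).Nodup from PySem.Set.nodup_ofList _)
          (show pvBn p ∈ PySem.List.dedup (l.map pvBn) from (PySem.Set.mem_ofList _ _).2 h)]
        rfl
      simp only [PySem.Dict.modify, hget, PySem.Dict.insert, hc, if_true]
      have hded : PySem.List.dedup ((l ++ [p]).map pvBn) = PySem.List.dedup (l.map pvBn) := by
        simp only [PySem.List.dedup, List.map_append, List.map_cons, List.map_nil, pvOfList_concat,
          PySem.Set.add]
        rw [if_pos]
        simp only [PySem.Set.contains, List.contains_iff_mem]
        exact (PySem.Set.mem_ofList _ _).2 h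
      show (pvG l).map _ = pvG (l ++ [p])
      unfold pvG
      rw [hded, List.map_map]
      apply List.map_congr_left
      intro n hn
      simp only [Function.comp]
      by_cases hnp : n = pvBn p
      · subst hnp
        simp only [beq_self_eq_true, if_true, List.filter_append, List.filter_cons,
          beq_self_eq_true, List.filter_nil]
      · have : (n == pvBn p) = false := by simp [hnp]
        simp only [this, List.filter_append, List.filter_cons, List.filter_nil]
        have h2 : (pvBn p == n) = false := by
          simp only [beq_eq_false_iff_ne, ne_eq]
          exact fun e => hnp e.symm
        simp [h2]
    · -- new basename: appended at the end with bucket [p]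
      have hc : (PySem.Dict.mk (pvG l)).contains (pvBn p) = false := by
        simp only [PySem.Dict.contains, hkeys, List.any_map, Function.comp,
          List.any_eq_false]
        intro x hx
        simp only [beq_iff_eq]
        exact fun e => h (e ▸ (PySem.Set.mem_ofList _ _).1 hx)
      have hget : (PySem.Dict.mk (pvG l)).getD (pvBn p) [] = [] := by
        simp only [PySem.Dict.getD, PySem.Dict.get?, hkeys]
        rw [List.find?_eq_none.2]
        · rfl
        · intro q hq
          rcases List.mem_map.1 hq with ⟨n, hn, rfl⟩
          simp only [beq_iff_eq]
          exact fun e => h (e ▸ (PySem.Set.mem_ofList _ _).1 hn)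
      simp only [PySem.Dict.modify, hget, PySem.Dict.insert, hc]
      show pvG l ++ [(pvBn p, [] ++ [p])] = pvG (l ++ [p])
      have hded : PySem.List.dedup ((l ++ [p]).map pvBn)
          = PySem.List.dedup (l.map pvBn) ++ [pvBn p] := by
        simp only [PySem.List.dedup, List.map_append, List.map_cons, List.map_nil, pvOfList_concat,
          PySem.Set.add]
        rw [if_neg]
        simp only [PySem.Set.contains, List.contains_iff_mem]
        exact fun hm => h ((PySem.Set.mem_ofList _ _).1 hm)
      unfold pvG
      rw [hded, List.map_append]
      congr 1
      · apply List.map_congr_left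
        intro n hn
        have hne : (pvBn p == n) = false := by
          simp only [beq_eq_false_iff_ne, ne_eq]
          exact fun e => h (e ▸ (PySem.Set.mem_ofList _ _).1 hn)
        simp [List.filter_append, hne]
      · have hnil : l.filter (fun q => pvBn q == pvBn p) = [] := by
          rw [List.filter_eq_nil_iff]
          intro q hq
          simp only [beq_iff_eq]
          exact fun e => h (List.mem_map.2 ⟨q, hq, e⟩)
        simp [List.filter_append, hnil]

-- ===== VERDICT (by name: the statement is the Claim_ definition above) =====
theorem index_by_name_py_spec : Claim_equal_index_by_name_py := by
  intro rel_files _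
  show index_by_name_py rel_files = index_by_name_py_alt rel_files
  unfold index_by_name_py index_by_name_py_alt
  simp only []
  rw [pvItems]
  unfold pvG
  rw [List.map_map]
  rfl
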